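-- pv_equiv track=rewrite | github.com/linusmoreau/framework | base_ui.py | det_command_secs
-- ===== SOURCE A (Python) =====
-- def det_command_secs(text):
--     command_secs = []
--     # command_secs: [[beg, end], [beg, end], [beg, end], etc.]
--     for i in range(len(text) - 1):
--         if text[i] + text[i + 1] == "</":
--             command_secs.append([i])
--         elif text[i] + text[i + 1] == "/>":
--             command_secs[-1].append(i + 1)
--     return command_secs
-- ===== SOURCE B (Python) =====
-- def det_command_secs(text):
--     n = len(text)
--     begins = [i for i in range(n - 1) if text[i] == "<" and text[i + 1] == "/"]
--     ends = [i + 1 for i in range(n - 1) if text[i] == "/" and text[i + 1] == ">"]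
--     bounds = begins[1:] + [n]
--     return [[b] + [e for e in ends if b < e <= hi] for b, hi in zip(begins, bounds)]
-- ===== Notes on version B (the rewrite author's own statement) =====
-- stated objective: simpler
-- what changed: Replaces A's single stateful scan that mutates the last section in place by two declarative trigger scans (begin-marker positions and end-marker positions) followed by a comprehension grouping each end into the half-open interval of its preceding begin.
-- crash fix: On inputs where a '/>' end marker occurs before any begin marker, A raises IndexError (command_secs[-1] on the empty list); B returns the sections of the remaining text, ignoring such unmatched ends (e.g. [] on "/>"). — e.g. on det_command_secs("/>"): A raises IndexError, B returns []
import Mathlib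
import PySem

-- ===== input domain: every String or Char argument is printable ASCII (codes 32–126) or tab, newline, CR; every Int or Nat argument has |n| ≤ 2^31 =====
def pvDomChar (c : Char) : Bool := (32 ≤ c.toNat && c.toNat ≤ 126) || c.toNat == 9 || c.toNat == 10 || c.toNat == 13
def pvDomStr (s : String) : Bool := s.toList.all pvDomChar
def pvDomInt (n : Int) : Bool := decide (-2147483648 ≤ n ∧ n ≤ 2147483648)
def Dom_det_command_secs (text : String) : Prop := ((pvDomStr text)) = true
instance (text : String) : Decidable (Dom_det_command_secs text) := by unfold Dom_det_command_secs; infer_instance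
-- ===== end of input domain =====

-- B replaces A's single mutating scan by two trigger scans (begin markers, end markers) and a
-- declarative grouping of each end into the interval of its preceding begin (objective: simpler).

-- ===== PORT A =====
-- "text[i] + text[i+1] == \"</\"" is ported as the two character tests; i and i+1 are indices
-- produced by range(len(text)-1), hence nonnegative and in range, so List.getElem? is exact here.
def pvIsBeg (cs : List Char) (i : Nat) : Bool := cs[i]? == some '<' && cs[i+1]? == some '/'

def pvIsEnd (cs : List Char) (i : Nat) : Bool := cs[i]? == some '/' && cs[i+1]? == some '>'

-- one loop iteration of A; `none` = the IndexError of command_secs[-1] on the empty list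
def pvStepA (cs : List Char) (st : Option (List (List Int))) (i : Nat) : Option (List (List Int)) :=
  match st with
  | none => none
  | some acc =>
    if pvIsBeg cs i then some (acc ++ [[(i : Int)]])
    else if pvIsEnd cs i then
      match acc.getLast? with
      | none => none                                   -- command_secs[-1] raises IndexError
      | some last => some (acc.dropLast ++ [last ++ [((i : Int) + 1)]])
    else some acc

def det_command_secs (text : String) : List (List Int) :=
  ((List.range (text.toList.length - 1)).foldl (pvStepA text.toList) (some [])).getD []

-- ===== PORT B =====
def det_command_secs_alt (text : String) : List (List Int) :=
  let cs := text.toList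
  let n := cs.length
  let begins := (List.range (n - 1)).filter (fun i => pvIsBeg cs i)
  let ends := ((List.range (n - 1)).filter (fun i => pvIsEnd cs i)).map (· + 1)
  let bounds := begins.drop 1 ++ [n]
  (begins.zip bounds).map (fun p =>
    (p.1 : Int) :: (ends.filter (fun e => decide (p.1 < e) && decide (e ≤ p.2))).map Int.ofNat)

-- ===== PRECONDITION & SPEC =====
-- Pre_ excludes exactly the inputs on which A raises IndexError: a '/>' end marker occurring before any begin marker.
def Pre_det_command_secs (text : String) : Prop :=
  ∀ i ∈ List.range (text.toList.length - 1),
    (text.toList[i]? = some '/' ∧ text.toList[i+1]? = some '>') →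
      ∃ j ∈ List.range i, (text.toList[j]? = some '<' ∧ text.toList[j+1]? = some '/')

instance (text : String) : Decidable (Pre_det_command_secs text) := by
  unfold Pre_det_command_secs; infer_instance

def pvWitness_det_command_secs : String := "</a/>"

-- On inputs with a '/>' end marker before any begin marker, A raises IndexError (command_secs[-1] on []);
-- B returns the sections of the well-formed part, ignoring such unmatched ends.
def Raises_det_command_secs (text : String) : Prop :=
  ∃ i ∈ List.range (text.toList.length - 1),
    (text.toList[i]? = some '/' ∧ text.toList[i+1]? = some '>') ∧
      ∀ j ∈ List.range i, ¬(text.toList[j]? = some '<' ∧ text.toList[j+1]? = some '/')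

instance (text : String) : Decidable (Raises_det_command_secs text) := by
  unfold Raises_det_command_secs; infer_instance

def pvRaiseWitness_det_command_secs : String := "/>"

def pvRaiseWitnessOut_det_command_secs : List (List Int) := []

def Spec_det_command_secs (text : String) (out : List (List Int)) : Prop := out = det_command_secs_alt text
instance (text : String) (out : List (List Int)) : Decidable (Spec_det_command_secs text out) := by unfold Spec_det_command_secs; infer_instance

-- ===== CLAIM (what is proved, stated in full; the proofs are below) =====
def Claim_equal_det_command_secs : Prop := ∀ (text : String), Dom_det_command_secs text → Pre_det_command_secs text → Spec_det_command_secs text (det_command_secs text)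

def Claim_raises_det_command_secs : Prop := (∀ (text : String), Dom_det_command_secs text → Raises_det_command_secs text → ¬ Pre_det_command_secs text) ∧ (Dom_det_command_secs (pvRaiseWitness_det_command_secs) ∧ Raises_det_command_secs (pvRaiseWitness_det_command_secs) ∧ det_command_secs_alt (pvRaiseWitness_det_command_secs) = pvRaiseWitnessOut_det_command_secs)

-- ===== LEMMAS AND PROOFS =====

-- proof-side recursive form of B's bucket construction (hi of a bucket = next begin, or M for the last)
def pvBuild (es : List Nat) (M : Nat) : List Nat → List (List Int)
  | [] => []
  | b :: rest =>
      ((b : Int) :: (es.filter (fun e => decide (b < e) && decide (e ≤ rest.headD M))).map Int.ofNat)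
        :: pvBuild es M rest

def pvBegs (cs : List Char) (m : Nat) : List Nat := (List.range m).filter (fun i => pvIsBeg cs i)

def pvEnds (cs : List Char) (m : Nat) : List Nat :=
  ((List.range m).filter (fun i => pvIsEnd cs i)).map (· + 1)

theorem pvBuild_concat (es : List Nat) (M b : Nat) (bs : List Nat) :
    pvBuild es M (bs ++ [b])
      = pvBuild es b bs
        ++ [(b : Int) :: (es.filter (fun e => decide (b < e) && decide (e ≤ M))).map Int.ofNat] := by
  induction bs with
  | nil => simp [pvBuild]
  | cons x bs ih =>
      cases bs with
      | nil => simp [pvBuild]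
      | cons y bs' => simpa [pvBuild] using ih

theorem pvBuild_bound_congr (es : List Nat) (M M' : Nat) (bs : List Nat)
    (h : ∀ e ∈ es, e ≤ M ∧ e ≤ M') : pvBuild es M bs = pvBuild es M' bs := by
  induction bs with
  | nil => rfl
  | cons b bs ih =>
      cases bs with
      | nil =>
          have hf : es.filter (fun e => decide (b < e) && decide (e ≤ M))
              = es.filter (fun e => decide (b < e) && decide (e ≤ M')) :=
            List.filter_congr (fun e he => by
              rcases h e he with ⟨h1, h2⟩; simp [h1, h2])
          simp [pvBuild, hf]
      | cons y bs' => simpa [pvBuild] using ih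

theorem pvBuild_end_irrel (es : List Nat) (M e' : Nat) (bs : List Nat)
    (hbs : ∀ x ∈ bs, x < e') (hM : M < e') :
    pvBuild (es ++ [e']) M bs = pvBuild es M bs := by
  induction bs with
  | nil => rfl
  | cons b bs ih =>
      have hone : List.filter (fun e => decide (b < e) && decide (e ≤ bs.headD M)) [e'] = [] := by
        cases bs with
        | nil =>
            have hM' : ¬ e' ≤ M := Nat.not_le.mpr hM
            simp [List.filter, List.headD, hM']
        | cons y bs' =>
            have hy : ¬ e' ≤ y := Nat.not_le.mpr (hbs y (by simp))
            simp [List.filter, List.headD, hy]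
      simp only [pvBuild, List.filter_append, hone, List.append_nil]
      rw [ih (fun x hx => hbs x (by simp [hx]))]

theorem pvBegs_mem_lt (cs : List Char) (m : Nat) : ∀ b ∈ pvBegs cs m, b < m := by
  intro b hb
  have := List.mem_filter.mp hb
  simpa using List.mem_range.mp this.1

theorem pvEnds_mem_le (cs : List Char) (m : Nat) : ∀ e ∈ pvEnds cs m, e ≤ m := by
  intro e he
  rcases List.mem_map.mp he with ⟨i, hi, rfl⟩
  have := List.mem_range.mp (List.mem_filter.mp hi).1
  omega

theorem pvBeg_end_disjoint (cs : List Char) (i : Nat) :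
    pvIsBeg cs i = true → pvIsEnd cs i = true → False := by
  intro h1 h2
  simp [pvIsBeg, pvIsEnd] at h1 h2
  rw [h1.1] at h2
  simpa using h2.1

-- main loop invariant: A's state after the first m iterations is B's grouping of the first m triggers
theorem pvLoopInv (cs : List Char)
    (hPre : ∀ i ∈ List.range (cs.length - 1), (cs[i]? = some '/' ∧ cs[i+1]? = some '>') →
      ∃ j ∈ List.range i, (cs[j]? = some '<' ∧ cs[j+1]? = some '/')) :
    ∀ m, m ≤ cs.length - 1 →
      (List.range m).foldl (pvStepA cs) (some [])
        = some (pvBuild (pvEnds cs m) cs.length (pvBegs cs m)) := by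
  intro m
  induction m with
  | zero => intro _; simp [pvEnds, pvBegs, pvBuild]
  | succ m ih =>
      intro hm
      have hm' : m ≤ cs.length - 1 := by omega
      have hmlt : m < cs.length - 1 := by omega
      rw [List.range_succ, List.foldl_append, ih hm']
      simp only [List.foldl_cons, List.foldl_nil]
      by_cases hB : pvIsBeg cs m = true
      · -- a '</' begin trigger at m
        have hE : ¬ pvIsEnd cs m = true := fun h => pvBeg_end_disjoint cs m hB h
        have hbegs : pvBegs cs (m+1) = pvBegs cs m ++ [m] := by
          simp [pvBegs, List.range_succ, List.filter_append, hB]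
        have hends : pvEnds cs (m+1) = pvEnds cs m := by
          simp [pvEnds, List.range_succ, List.filter_append, Bool.eq_false_iff.mpr hE]
        rw [hbegs, hends, pvBuild_concat]
        have h1 : pvBuild (pvEnds cs m) m (pvBegs cs m)
            = pvBuild (pvEnds cs m) cs.length (pvBegs cs m) :=
          pvBuild_bound_congr _ _ _ _ (fun e he => by
            have := pvEnds_mem_le cs m e he
            constructor <;> omega)
        have h2 : ((pvEnds cs m).filter (fun e => decide (m < e) && decide (e ≤ cs.length))) = [] := by
          rw [List.filter_eq_nil_iff]
          intro e he
          have := pvEnds_mem_le cs m e he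
          simp; omega
        simp [pvStepA, hB, h1, h2]
      · by_cases hE : pvIsEnd cs m = true
        · -- a '/>' end trigger at m; Pre_ supplies an earlier begin, so the state is nonempty
          have hEprop : cs[m]? = some '/' ∧ cs[m+1]? = some '>' := by
            have := hE; simp [pvIsEnd] at this; exact this
          obtain ⟨j, hj, hjB⟩ := hPre m (List.mem_range.mpr (by simpa using hmlt)) (by simpa using hEprop)
          have hjBb : pvIsBeg cs j = true := by simp [pvIsBeg]; exact hjB
          have hjmem : j ∈ pvBegs cs m := by
            refine List.mem_filter.mpr ⟨List.mem_range.mpr ?_, hjBb⟩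
            exact List.mem_range.mp hj
          have hne : pvBegs cs m ≠ [] := fun h => by simp [h] at hjmem
          obtain ⟨bs, b, hsplit⟩ : ∃ bs b, pvBegs cs m = bs ++ [b] := by
            rcases List.eq_nil_or_concat (pvBegs cs m) with h | ⟨bs, b, h⟩
            · exact absurd h hne
            · exact ⟨bs, b, by simpa using h⟩
          have hblt : b < m := pvBegs_mem_lt cs m b (by simp [hsplit])
          have hbslt : ∀ x ∈ bs, x < m + 1 := by
            intro x hx
            have := pvBegs_mem_lt cs m x (by simp [hsplit, hx])
            omega
          have hbegs : pvBegs cs (m+1) = pvBegs cs m := by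
            simp [pvBegs, List.range_succ, List.filter_append, Bool.eq_false_iff.mpr hB]
          have hends : pvEnds cs (m+1) = pvEnds cs m ++ [m+1] := by
            simp [pvEnds, List.range_succ, List.filter_append, hE]
          rw [hbegs, hends, hsplit, pvBuild_concat, pvBuild_concat]
          rw [pvBuild_end_irrel _ _ _ _ hbslt (by omega)]
          have hfil : ((pvEnds cs m ++ [m+1]).filter (fun e => decide (b < e) && decide (e ≤ cs.length)))
              = (pvEnds cs m).filter (fun e => decide (b < e) && decide (e ≤ cs.length)) ++ [m+1] := by
            rw [List.filter_append]
            congr 1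
            have h1 : b < m + 1 := by omega
            have h2 : m + 1 ≤ cs.length := by omega
            simp [List.filter, h1, h2]
          rw [hfil]
          simp [pvStepA, Bool.eq_false_iff.mpr hB, hE]
        · -- no trigger at m
          have hbegs : pvBegs cs (m+1) = pvBegs cs m := by
            simp [pvBegs, List.range_succ, List.filter_append, Bool.eq_false_iff.mpr hB]
          have hends : pvEnds cs (m+1) = pvEnds cs m := by
            simp [pvEnds, List.range_succ, List.filter_append, Bool.eq_false_iff.mpr hE]
          simp [pvStepA, Bool.eq_false_iff.mpr hB, Bool.eq_false_iff.mpr hE, hbegs, hends]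

-- B's zip-with-bounds form equals the recursive pvBuild form
theorem pvZip_eq_build (es : List Nat) (n : Nat) (bs : List Nat) :
    ((bs.zip (bs.drop 1 ++ [n])).map (fun p =>
        (p.1 : Int) :: (es.filter (fun e => decide (p.1 < e) && decide (e ≤ p.2))).map Int.ofNat))
      = pvBuild es n bs := by
  induction bs with
  | nil => rfl
  | cons b bs ih =>
      cases bs with
      | nil => simp [pvBuild]
      | cons y bs' =>
          simp only [List.drop_succ_cons, List.drop_zero] at ih ⊢
          simp only [List.cons_append, List.zip_cons_cons, List.map_cons, ih, pvBuild, List.headD]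
          rfl

-- ===== VERDICT (by name: the statement is the Claim_ definition above) =====
theorem det_command_secs_spec : Claim_equal_det_command_secs := by
  intro text _ hPre
  show det_command_secs text = det_command_secs_alt text
  have h := pvLoopInv text.toList hPre (text.toList.length - 1) (le_refl _)
  have halt : det_command_secs_alt text
      = pvBuild (pvEnds text.toList (text.toList.length - 1)) text.toList.length
          (pvBegs text.toList (text.toList.length - 1)) := by
    rw [← pvZip_eq_build]; rfl
  rw [halt]
  unfold det_command_secs
  rw [h]
  rfl

@[simp] theorem det_command_secs_raises : Claim_raises_det_command_secs := by
  unfold Claim_raises_det_command_secs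
  constructor
  · intro text _ hR hPre
    obtain ⟨i, hi, hE, hall⟩ := hR
    obtain ⟨j, hj, hB⟩ := hPre i hi hE
    exact hall j hj hB
  · exact ⟨by decide, by decide, by decide⟩
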